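-- pv_equiv track=rewrite | github.com/xiaochengou123/chencheng | app/tool/meetspot_recommender.py | _select_best_poi
-- ===== SOURCE A (Python) =====
-- from typing import Any, Dict, List, Optional, Tuple
--
-- def _select_best_poi(pois: List[Dict], keyword: str, city_hint: str) -> Optional[Dict]:
--     if not pois:
--         return None
--
--     keyword_lower = keyword.lower()
--
--     for poi in pois:
--         if poi.get("name", "").lower() == keyword_lower:
--             return poi
--
--     if city_hint:
--         for poi in pois:
--             if keyword_lower in poi.get("name", "").lower() and city_hint in poi.get("cityname", ""):
--                 return poi
--
--     for poi in pois:
--         if keyword_lower in poi.get("name", "").lower():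
--             return poi
--
--     return pois[0]
-- ===== SOURCE B (Python) =====
-- def _select_best_poi(pois, keyword, city_hint):
--     if not pois:
--         return None
--     keyword_lower = keyword.lower()
--     best = None
--     best_rank = 3
--     for poi in pois:
--         name_lower = poi.get("name", "").lower()
--         if name_lower == keyword_lower:
--             rank = 0
--         elif keyword_lower in name_lower and city_hint and city_hint in poi.get("cityname", ""):
--             rank = 1
--         elif keyword_lower in name_lower:
--             rank = 2
--         else:
--             rank = 3
--         if rank < best_rank:
--             best = poi
--             best_rank = rank
--     return best if best is not None else pois[0]
-- ===== Notes on version B (the rewrite author's own statement) =====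
-- stated objective: alternative
-- what changed: Replaced A's four sequential scans over pois with a single pass that assigns each POI a priority rank (0 exact name match, 1 substring+city match, 2 substring match, 3 none) and keeps the first POI of strictly smallest rank.
import Mathlib
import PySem

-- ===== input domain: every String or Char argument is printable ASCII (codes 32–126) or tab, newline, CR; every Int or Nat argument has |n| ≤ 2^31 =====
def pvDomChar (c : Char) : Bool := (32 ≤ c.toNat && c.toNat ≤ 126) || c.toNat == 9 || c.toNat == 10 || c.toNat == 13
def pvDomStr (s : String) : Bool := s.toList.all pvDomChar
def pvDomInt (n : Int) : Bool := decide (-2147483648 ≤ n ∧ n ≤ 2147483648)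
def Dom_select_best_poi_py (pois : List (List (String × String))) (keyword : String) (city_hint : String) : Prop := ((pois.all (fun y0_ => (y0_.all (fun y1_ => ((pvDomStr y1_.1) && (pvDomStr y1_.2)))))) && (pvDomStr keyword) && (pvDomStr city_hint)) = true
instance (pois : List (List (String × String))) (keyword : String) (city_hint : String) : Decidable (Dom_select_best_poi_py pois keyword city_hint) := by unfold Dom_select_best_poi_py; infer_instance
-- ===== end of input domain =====

-- B replaces A's four sequential scans with one pass that scores each POI by priority rank
-- and keeps the first POI of strictly smallest rank (objective: alternative, same asymptotic cost).

-- ===== PORT A =====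
-- poi.get(k, "") on the association list (first match, default "")
def pvDictGetD (poi : List (String × String)) (k : String) : String :=
  ((poi.find? (fun q => q.1 == k)).map Prod.snd).getD ""

def select_best_poi_py (pois : List (List (String × String))) (keyword : String) (city_hint : String) : Option (List (String × String)) :=
  match pois with
  | [] => none
  | p0 :: _ =>
    let kl := PySem.Str.lower keyword
    -- pass 1: exact name match
    match pois.find? (fun poi => PySem.Str.lower (pvDictGetD poi "name") == kl) with
    | some poi => some poi
    | none =>
      -- pass 2 (only if city_hint truthy): substring + city match
      match (if city_hint ≠ "" then
               pois.find? (fun poi => PySem.Str.isIn kl (PySem.Str.lower (pvDictGetD poi "name"))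
                                      && PySem.Str.isIn city_hint (pvDictGetD poi "cityname"))
             else none) with
      | some poi => some poi
      | none =>
        -- pass 3: substring match
        match pois.find? (fun poi => PySem.Str.isIn kl (PySem.Str.lower (pvDictGetD poi "name"))) with
        | some poi => some poi
        | none => some p0   -- fallback pois[0]

-- ===== PORT B =====
def pvRankOf (kl ch : String) (poi : List (String × String)) : Nat :=
  let nl := PySem.Str.lower (pvDictGetD poi "name")
  if nl == kl then 0
  else if PySem.Str.isIn kl nl && !(ch == "") && PySem.Str.isIn ch (pvDictGetD poi "cityname") then 1
  else if PySem.Str.isIn kl nl then 2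
  else 3

def pvLoopB (kl ch : String) : List (List (String × String)) → Option (List (String × String)) × Nat → Option (List (String × String)) × Nat
  | [], s => s
  | p :: t, (b, r) =>
    let rp := pvRankOf kl ch p
    if rp < r then pvLoopB kl ch t (some p, rp) else pvLoopB kl ch t (b, r)

def select_best_poi_py_alt (pois : List (List (String × String))) (keyword : String) (city_hint : String) : Option (List (String × String)) :=
  match pois with
  | [] => none
  | p0 :: _ =>
    let kl := PySem.Str.lower keyword
    match pvLoopB kl city_hint pois (none, 3) with
    | (some p, _) => some p
    | (none, _) => some p0

-- ===== PRECONDITION & SPEC =====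
def Spec_select_best_poi_py (pois : List (List (String × String))) (keyword : String) (city_hint : String) (out : Option (List (String × String))) : Prop := out = select_best_poi_py_alt pois keyword city_hint
instance (pois : List (List (String × String))) (keyword : String) (city_hint : String) (out : Option (List (String × String))) : Decidable (Spec_select_best_poi_py pois keyword city_hint out) := by unfold Spec_select_best_poi_py; infer_instance

-- ===== CLAIM (what is proved, stated in full; the proofs are below) =====
def Claim_equal_select_best_poi_py : Prop := ∀ (pois : List (List (String × String))) (keyword : String) (city_hint : String), Dom_select_best_poi_py pois keyword city_hint → Spec_select_best_poi_py pois keyword city_hint (select_best_poi_py pois keyword city_hint)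

-- ===== LEMMAS AND PROOFS =====

theorem find?_congr_mem {α : Type} (l : List α) (p q : α → Bool)
    (h : ∀ x ∈ l, p x = q x) : l.find? p = l.find? q := by
  induction l with
  | nil => rfl
  | cons a t ih =>
    simp only [List.find?_cons]
    rw [h a (by simp)]
    cases q a
    · exact ih (fun x hx => h x (by simp [hx]))
    · rfl

theorem pvLoop0 (kl ch : String) (l : List (List (String × String))) (b : Option (List (String × String))) :
    pvLoopB kl ch l (b, 0) = (b, 0) := by
  induction l with
  | nil => rfl
  | cons p t ih => simp [pvLoopB, ih]

theorem pvLoop1 (kl ch : String) (l : List (List (String × String))) (b : Option (List (String × String))) :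
    pvLoopB kl ch l (b, 1) =
      match l.find? (fun p => pvRankOf kl ch p == 0) with
      | some p => (some p, 0)
      | none => (b, 1) := by
  induction l generalizing b with
  | nil => rfl
  | cons p t ih =>
    by_cases h : pvRankOf kl ch p = 0
    · simp [pvLoopB, h, pvLoop0]
    · have h' : ¬ pvRankOf kl ch p < 1 := by omega
      simp [pvLoopB, h, h', ih]

theorem pvLoop2 (kl ch : String) (l : List (List (String × String))) (b : Option (List (String × String))) :
    pvLoopB kl ch l (b, 2) =
      match l.find? (fun p => pvRankOf kl ch p == 0) with
      | some p => (some p, 0)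
      | none =>
        match l.find? (fun p => pvRankOf kl ch p == 1) with
        | some p => (some p, 1)
        | none => (b, 2) := by
  induction l generalizing b with
  | nil => rfl
  | cons p t ih =>
    by_cases h0 : pvRankOf kl ch p = 0
    · simp [pvLoopB, h0, pvLoop0]
    · by_cases h1 : pvRankOf kl ch p = 1
      · simp [pvLoopB, h1, pvLoop1]
      · have h' : ¬ pvRankOf kl ch p < 2 := by omega
        simp [pvLoopB, h0, h1, h', ih]

theorem pvLoop3 (kl ch : String) (l : List (List (String × String))) (b : Option (List (String × String))) :
    pvLoopB kl ch l (b, 3) =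
      match l.find? (fun p => pvRankOf kl ch p == 0) with
      | some p => (some p, 0)
      | none =>
        match l.find? (fun p => pvRankOf kl ch p == 1) with
        | some p => (some p, 1)
        | none =>
          match l.find? (fun p => pvRankOf kl ch p == 2) with
          | some p => (some p, 2)
          | none => (b, 3) := by
  induction l generalizing b with
  | nil => rfl
  | cons p t ih =>
    by_cases h0 : pvRankOf kl ch p = 0
    · simp [pvLoopB, h0, pvLoop0]
    · by_cases h1 : pvRankOf kl ch p = 1
      · simp [pvLoopB, h1, pvLoop1]
      · by_cases h2 : pvRankOf kl ch p = 2
        · simp [pvLoopB, h2, pvLoop2]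
        · have h' : ¬ pvRankOf kl ch p < 3 := by omega
          simp [pvLoopB, h0, h1, h2, h', ih]

-- rank characterizations
theorem rank0_iff (kl ch : String) (p : List (String × String)) :
    (pvRankOf kl ch p == 0) = (PySem.Str.lower (pvDictGetD p "name") == kl) := by
  simp only [pvRankOf]
  split_ifs with h1 h2 <;> simp_all

theorem rank1_iff (kl ch : String) (p : List (String × String))
    (h0 : ¬ (PySem.Str.lower (pvDictGetD p "name") == kl) = true) (hch : ch ≠ "") :
    (pvRankOf kl ch p == 1) =
      (PySem.Str.isIn kl (PySem.Str.lower (pvDictGetD p "name"))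
       && PySem.Str.isIn ch (pvDictGetD p "cityname")) := by
  simp only [pvRankOf]
  have : (ch == "") = false := by simpa using hch
  split_ifs with h1 h2 h3' <;> simp_all

theorem rank1_false_of_ch_empty (kl : String) (p : List (String × String)) :
    (pvRankOf kl "" p == 1) = false := by
  simp only [pvRankOf]
  split_ifs <;> simp_all

theorem rank2_iff (kl ch : String) (p : List (String × String))
    (h0 : ¬ (PySem.Str.lower (pvDictGetD p "name") == kl) = true)
    (h1 : ¬ (pvRankOf kl ch p == 1) = true) :
    (pvRankOf kl ch p == 2) = PySem.Str.isIn kl (PySem.Str.lower (pvDictGetD p "name")) := by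
  simp only [pvRankOf] at *
  split_ifs at * <;> simp_all

-- ===== VERDICT (by name: the statement is the Claim_ definition above) =====
theorem select_best_poi_py_spec : Claim_equal_select_best_poi_py := by
  intro pois keyword city_hint _
  unfold Spec_select_best_poi_py
  cases pois with
  | nil => rfl
  | cons p0 t =>
    simp only [select_best_poi_py.eq_def, select_best_poi_py_alt.eq_def]
    generalize PySem.Str.lower keyword = kl
    rw [pvLoop3]
    -- pass 1 vs rank 0
    rw [show (p0 :: t).find? (fun p => pvRankOf kl city_hint p == 0)
          = (p0 :: t).find? (fun p => PySem.Str.lower (pvDictGetD p "name") == kl) from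
        find?_congr_mem _ _ _ (fun x _ => rank0_iff kl city_hint x)]
    cases hf0 : (p0 :: t).find? (fun p => PySem.Str.lower (pvDictGetD p "name") == kl) with
    | some p => simp
    | none =>
      have hall0 : ∀ x ∈ (p0 :: t), ¬ (PySem.Str.lower (pvDictGetD x "name") == kl) = true := by
        intro x hx
        exact List.find?_eq_none.mp hf0 x hx
      by_cases hch : city_hint ≠ ""
      · -- pass 2 present
        rw [show (p0 :: t).find? (fun p => pvRankOf kl city_hint p == 1)
              = (p0 :: t).find? (fun p => PySem.Str.isIn kl (PySem.Str.lower (pvDictGetD p "name"))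
                                  && PySem.Str.isIn city_hint (pvDictGetD p "cityname")) from
            find?_congr_mem _ _ _ (fun x hx => rank1_iff kl city_hint x (hall0 x hx) hch)]
        simp only [if_pos hch]
        cases hf1 : (p0 :: t).find? (fun p => PySem.Str.isIn kl (PySem.Str.lower (pvDictGetD p "name"))
                                      && PySem.Str.isIn city_hint (pvDictGetD p "cityname")) with
        | some p => simp
        | none =>
          have hall1 : ∀ x ∈ (p0 :: t), ¬ (pvRankOf kl city_hint x == 1) = true := by
            intro x hx
            rw [rank1_iff kl city_hint x (hall0 x hx) hch]
            exact List.find?_eq_none.mp hf1 x hx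
          rw [show (p0 :: t).find? (fun p => pvRankOf kl city_hint p == 2)
                = (p0 :: t).find? (fun p => PySem.Str.isIn kl (PySem.Str.lower (pvDictGetD p "name"))) from
              find?_congr_mem _ _ _ (fun x hx => rank2_iff kl city_hint x (hall0 x hx) (hall1 x hx))]
          cases (p0 :: t).find? (fun p => PySem.Str.isIn kl (PySem.Str.lower (pvDictGetD p "name"))) <;> simp
      · -- city_hint = "" : pass 2 skipped, rank 1 never fires
        rw [not_ne_iff] at hch
        subst hch
        rw [show (p0 :: t).find? (fun p => pvRankOf kl "" p == 1) = none from
            List.find?_eq_none.mpr (fun x _ => by rw [rank1_false_of_ch_empty]; simp)]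
        have hall1 : ∀ x ∈ (p0 :: t), ¬ (pvRankOf kl "" x == 1) = true := by
          intro x _; rw [rank1_false_of_ch_empty]; simp
        rw [show (p0 :: t).find? (fun p => pvRankOf kl "" p == 2)
              = (p0 :: t).find? (fun p => PySem.Str.isIn kl (PySem.Str.lower (pvDictGetD p "name"))) from
            find?_congr_mem _ _ _ (fun x hx => rank2_iff kl "" x (hall0 x hx) (hall1 x hx))]
        simp only [ne_eq, not_true_eq_false, if_false]
        cases (p0 :: t).find? (fun p => PySem.Str.isIn kl (PySem.Str.lower (pvDictGetD p "name"))) <;> simp
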